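-- pv_equiv track=rewrite | github.com/owid/etl | etl/helpers.py | _recursive_get_all_step_dependencies
-- ===== SOURCE A (Python) =====
-- from typing import Any, Dict, Iterable, Iterator, List, Optional, Set, Union, cast
--
-- def _recursive_get_all_step_dependencies(dag: Dict[str, Any], step: str, dependencies: Set[str] = set()) -> Set[str]:
--     if step in dag:
--         # If step is in the dag, gather all its substeps.
--         substeps = dag[step]
--         # Add substeps to the set of dependencies (union of sets, to avoid repetitions).
--         dependencies = dependencies | set(substeps)
--         for substep in substeps:
--             # For each of the substeps, repeat the process.
--             dependencies = dependencies | _recursive_get_all_step_dependencies(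
--                 dag, step=substep, dependencies=dependencies
--             )
--     else:
--         # If step is not in the dag, return the default dependencies (which is an empty set).
--         pass
--
--     return dependencies
-- ===== SOURCE B (Python) =====
-- from typing import Any, Dict, Set
--
--
-- def _recursive_get_all_step_dependencies(dag: Dict[str, Any], step: str, dependencies: Set[str] = set()) -> Set[str]:
--     # Iterative depth-first traversal over an explicit worklist, with a set of
--     # already-expanded steps so every step of the dag is expanded at most once.
--     seen = set()
--     stack = [step]
--     while stack:
--         s = stack.pop(0)
--         if s in seen or s not in dag:
--             continue
--         substeps = dag[s]
--         seen = seen | {s}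
--         dependencies = dependencies | set(substeps)
--         stack = list(substeps) + stack
--     return dependencies
-- ===== Notes on version B (the rewrite author's own statement) =====
-- stated objective: alternative
-- what changed: B replaces A's unmemoized recursion (which re-expands a step once per path reaching it) by an iterative worklist loop with an explicit stack and a visited set, so each step of the dag is expanded at most once and there is no recursion at all.
import Mathlib
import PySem

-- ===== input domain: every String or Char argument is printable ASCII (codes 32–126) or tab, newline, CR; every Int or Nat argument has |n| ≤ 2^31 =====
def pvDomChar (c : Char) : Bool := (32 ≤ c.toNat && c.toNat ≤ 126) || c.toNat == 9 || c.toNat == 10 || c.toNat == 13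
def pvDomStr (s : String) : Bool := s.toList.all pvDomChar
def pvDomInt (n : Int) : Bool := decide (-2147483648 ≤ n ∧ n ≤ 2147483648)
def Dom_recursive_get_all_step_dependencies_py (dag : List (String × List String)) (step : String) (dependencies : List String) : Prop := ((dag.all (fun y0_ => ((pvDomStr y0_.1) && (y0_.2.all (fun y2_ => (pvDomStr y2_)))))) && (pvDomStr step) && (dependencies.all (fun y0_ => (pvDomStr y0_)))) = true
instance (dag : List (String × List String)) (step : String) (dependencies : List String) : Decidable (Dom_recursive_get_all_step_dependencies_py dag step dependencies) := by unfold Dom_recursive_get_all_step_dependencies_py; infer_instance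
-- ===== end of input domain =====

-- B replaces A's unmemoized recursion by an iterative worklist loop (explicit stack + visited set),
-- so each step of the dag is expanded at most once (alternative algorithm, same return value).

-- dict lookup on the association list (first match), shared primitive of both ports
def pvLookup (dag : List (String × List String)) (s : String) : Option (List String) :=
  (dag.find? (fun p => p.1 == s)).map (fun p => p.2)

-- ===== PORT A =====
-- fuel (dag.length + 1) only makes the recursion total; under Pre_ it is never exhausted
def pvAgo (dag : List (String × List String)) : Nat → String → List String → List String
  | 0, _, deps => deps
  | f+1, step, deps =>
    match pvLookup dag step with
    | some substeps =>
      let deps1 := PySem.Set.union deps substeps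
      substeps.foldl (fun d sub => PySem.Set.union d (pvAgo dag f sub d)) deps1
    | none => deps

def recursive_get_all_step_dependencies_py (dag : List (String × List String)) (step : String) (dependencies : List String) : List String :=
  pvAgo dag (dag.length + 1) step dependencies

-- ===== PORT B =====
-- pvKeys / pvUc / the three lemmas below are cited by pvLoop's termination proof
def pvKeys (dag : List (String × List String)) : List String := dag.map Prod.fst
def pvUc (dag : List (String × List String)) (seen : List String) : Nat :=
  ((pvKeys dag).filter (fun k => !seen.contains k)).length

theorem pv_union_singleton {s : List String} {x : String} (h : x ∉ s) : PySem.Set.union s [x] = s ++ [x] := by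
  show PySem.Set.update s [x] = s ++ [x]
  rw [PySem.Set.update_eq_append_filter,
    PySem.Set.ofList_eq_self_of_nodup [x] (List.nodup_singleton x)]
  have : List.filter (fun y => !PySem.Set.contains s y) [x] = [x] := by
    rw [List.filter_eq_self]
    intro a ha
    simp only [List.mem_singleton] at ha
    subst ha
    simp [h]
  rw [this]

theorem pv_lookup_isSome {dag : List (String × List String)} {s : String} :
    (pvLookup dag s).isSome = true ↔ s ∈ pvKeys dag := by
  simp [pvLookup, pvKeys, List.find?_isSome, List.mem_map]

theorem pv_uc_lt {dag : List (String × List String)} {seen : List String} {s : String}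
    (hk : s ∈ pvKeys dag) (hs : s ∉ seen) : pvUc dag (seen ++ [s]) < pvUc dag seen := by
  have hsub : (List.filter (fun k => !(seen ++ [s]).contains k) (pvKeys dag)).Sublist
      (List.filter (fun k => !seen.contains k) (pvKeys dag)) := by
    apply List.monotone_filter_right
    intro a ha
    simp only [Bool.not_eq_eq_eq_not, Bool.not_true, List.contains_eq_mem, decide_eq_false_iff_not,
      List.mem_append, List.mem_singleton] at ha ⊢
    exact fun hc => ha (Or.inl hc)
  have hne : (List.filter (fun k => !(seen ++ [s]).contains k) (pvKeys dag)) ≠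
      (List.filter (fun k => !seen.contains k) (pvKeys dag)) := by
    intro he
    have h1 : s ∈ List.filter (fun k => !seen.contains k) (pvKeys dag) := by
      rw [List.mem_filter]
      exact ⟨hk, by simp [hs]⟩
    rw [← he, List.mem_filter] at h1
    simp at h1
  rw [pvUc, pvUc]
  rcases Nat.lt_or_ge (List.filter (fun k => !(seen ++ [s]).contains k) (pvKeys dag)).length
      (List.filter (fun k => !seen.contains k) (pvKeys dag)).length with h | h
  · exact h
  · exact absurd (hsub.eq_of_length (Nat.le_antisymm hsub.length_le h)) hne

-- the worklist loop of B: pop the front of the stack, skip if already expanded or not a dag key,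
-- otherwise mark it seen, add its substeps to the dependencies and push them onto the stack
def pvLoop (dag : List (String × List String)) (stack seen deps : List String) : List String :=
  match stack with
  | [] => deps
  | s :: rest =>
    if hseen : PySem.Set.contains seen s then pvLoop dag rest seen deps
    else
      match hl : pvLookup dag s with
      | none => pvLoop dag rest seen deps
      | some substeps =>
          pvLoop dag (substeps ++ rest) (PySem.Set.union seen [s]) (PySem.Set.union deps substeps)
termination_by (pvUc dag seen, stack.length)
decreasing_by
  · exact Prod.Lex.right _ (by simp)
  · exact Prod.Lex.right _ (by simp)
  · apply Prod.Lex.left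
    have hs : s ∉ seen := by
      simpa [PySem.Set.contains] using hseen
    have hk : s ∈ pvKeys dag := pv_lookup_isSome.mp (by rw [hl]; rfl)
    rw [pv_union_singleton hs]
    exact pv_uc_lt hk hs

def recursive_get_all_step_dependencies_py_alt (dag : List (String × List String)) (step : String) (dependencies : List String) : List String :=
  pvLoop dag [step] PySem.Set.empty dependencies

-- ===== PRECONDITION & SPEC =====
-- pvReachAux dag n acc: acc closed n times under the dag's step -> substep edges (bounded reachability closure)
def pvReachAux (dag : List (String × List String)) : Nat → List String → List String
  | 0, acc => acc
  | n+1, acc => pvReachAux dag n (PySem.Set.update acc (acc.flatMap (fun v => (pvLookup dag v).getD [])))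

-- pvAcycBool dag step: no step reachable from `step` lies on a cycle of the dag
def pvAcycBool (dag : List (String × List String)) (step : String) : Bool :=
  (pvReachAux dag (dag.length + 1) [step]).all
    (fun v => !(pvReachAux dag (dag.length + 1) (PySem.Set.ofList ((pvLookup dag v).getD []))).contains v)

-- Pre_ excludes exactly the inputs on which A's unmemoized recursion diverges (Python
-- RecursionError): those where some step reachable from `step` lies on a cycle of the dag; it also
-- requires `dependencies` to be duplicate-free, since it models a Python set.
def Pre_recursive_get_all_step_dependencies_py (dag : List (String × List String)) (step : String) (dependencies : List String) : Prop :=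
  dependencies.Nodup ∧ pvAcycBool dag step = true
instance (dag : List (String × List String)) (step : String) (dependencies : List String) : Decidable (Pre_recursive_get_all_step_dependencies_py dag step dependencies) := by unfold Pre_recursive_get_all_step_dependencies_py; infer_instance

def pvWitness_recursive_get_all_step_dependencies_py : (List (String × List String)) × String × List String :=
  ([("a", ["b", "c"]), ("b", ["c"])], "a", ["z"])

def Spec_recursive_get_all_step_dependencies_py (dag : List (String × List String)) (step : String) (dependencies : List String) (out : List String) : Prop := out = recursive_get_all_step_dependencies_py_alt dag step dependencies
instance (dag : List (String × List String)) (step : String) (dependencies : List String) (out : List String) : Decidable (Spec_recursive_get_all_step_dependencies_py dag step dependencies out) := by unfold Spec_recursive_get_all_step_dependencies_py; infer_instance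

-- ===== CLAIM (what is proved, stated in full; the proofs are below) =====
def Claim_equal_recursive_get_all_step_dependencies_py : Prop := ∀ (dag : List (String × List String)) (step : String) (dependencies : List String), Dom_recursive_get_all_step_dependencies_py dag step dependencies → Pre_recursive_get_all_step_dependencies_py dag step dependencies → Spec_recursive_get_all_step_dependencies_py dag step dependencies (recursive_get_all_step_dependencies_py dag step dependencies)

-- ===== LEMMAS AND PROOFS =====

-- pvVisit is the proof's intermediate model: the recursive DFS with a threaded visited set;
-- pvMain shows it computes A's value, pvBridge shows B's worklist loop simulates it.
def pvVisit (dag : List (String × List String)) : Nat → String → List String → List String → List String × List String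
  | 0, _, seen, deps => (seen, deps)
  | f+1, s, seen, deps =>
    if PySem.Set.contains seen s then (seen, deps)
    else match pvLookup dag s with
      | none => (seen, deps)
      | some substeps =>
        let seen1 := PySem.Set.union seen [s]
        let deps1 := PySem.Set.union deps substeps
        substeps.foldl (fun p sub => pvVisit dag f sub p.1 p.2) (seen1, deps1)

def pvClosed (dag : List (String × List String)) (seen deps grays : List String) : Prop :=
  ∀ v ∈ seen, v ∉ grays → ∀ subs, pvLookup dag v = some subs →
    (∀ t ∈ subs, t ∈ deps) ∧ (∀ t ∈ subs, t ∈ pvKeys dag → t ∈ seen ∧ t ∉ grays)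

theorem pv_union_prefix (s t : List String) : s <+: PySem.Set.union s t := by
  show s <+: PySem.Set.update s t
  rw [PySem.Set.update_eq_append_filter]
  exact ⟨_, rfl⟩
theorem pv_union_of_subset {s t : List String} (h : ∀ x ∈ t, x ∈ s) : PySem.Set.union s t = s := by
  show PySem.Set.update s t = s
  rw [PySem.Set.update_eq_append_filter]
  have : List.filter (fun y => !PySem.Set.contains s y) (PySem.Set.ofList t) = [] := by
    rw [List.filter_eq_nil_iff]
    intro a ha
    have : a ∈ s := h a (by simpa [PySem.Set.mem_ofList] using ha)
    simp [this]
  rw [this, List.append_nil]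
theorem pv_union_absorb {s t : List String} (h : s <+: t) (hn : t.Nodup) : PySem.Set.union s t = t := by
  obtain ⟨e, rfl⟩ := h
  show PySem.Set.update s (s ++ e) = s ++ e
  rw [PySem.Set.update_eq_append_filter, PySem.Set.ofList_eq_self_of_nodup _ hn,
    List.filter_append]
  have h1 : List.filter (fun y => !PySem.Set.contains s y) s = [] := by
    rw [List.filter_eq_nil_iff]; intro a ha; simp [ha]
  have hd := List.disjoint_of_nodup_append hn
  have h2 : List.filter (fun y => !PySem.Set.contains s y) e = e := by
    rw [List.filter_eq_self]
    intro a ha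
    have : a ∉ s := fun hc => hd hc ha
    simp [this]
  rw [h1, h2, List.nil_append]

theorem pvAgo_not_key {dag : List (String × List String)} {t : String}
    (h : pvLookup dag t = none) (f : Nat) (d : List String) : pvAgo dag f t d = d := by
  cases f with
  | zero => rfl
  | succ f => simp [pvAgo, h]

theorem pv_foldl_const {α β : Type} {l : List α} {d : β} {g : β → α → β}
    (h : ∀ x ∈ l, g d x = d) : l.foldl g d = d := by
  induction l with
  | nil => rfl
  | cons x xs ih =>
    rw [List.foldl_cons, h x (by simp)]
    exact ih (fun y hy => h y (by simp [hy]))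

theorem pv_lookup_eq_none {dag : List (String × List String)} {t : String}
    (h : t ∉ pvKeys dag) : pvLookup dag t = none := by
  rw [← Option.not_isSome_iff_eq_none]
  intro hs
  exact h (pv_lookup_isSome.mp hs)

theorem pvAgo_closed {dag : List (String × List String)} {seen deps grays : List String}
    (hc : pvClosed dag seen deps grays) :
    ∀ (f : Nat) (v : String) (deps' : List String), (∀ x ∈ deps, x ∈ deps') →
      v ∈ seen → v ∉ grays → pvAgo dag f v deps' = deps' := by
  intro f
  induction f with
  | zero => intro v deps' _ _ _; rfl
  | succ f ih =>
    intro v deps' hsub hvseen hvg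
    cases hl : pvLookup dag v with
    | none => simp [pvAgo, hl]
    | some subs =>
      obtain ⟨h1, h2⟩ := hc v hvseen hvg subs hl
      have hu : PySem.Set.union deps' subs = deps' :=
        pv_union_of_subset (fun x hx => hsub x (h1 x hx))
      simp only [pvAgo, hl]
      rw [hu]
      apply pv_foldl_const
      intro t ht
      have hr : pvAgo dag f t deps' = deps' := by
        by_cases hk : t ∈ pvKeys dag
        · obtain ⟨hts, htg⟩ := h2 t ht hk
          exact ih t deps' hsub hts htg
        · exact pvAgo_not_key (pv_lookup_eq_none hk) f deps'
      rw [hr]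
      exact pv_union_of_subset (fun x hx => hx)
-- edges and explicit edge-paths of the dag (p lists the intermediate steps)
def pvEdge (dag : List (String × List String)) (v w : String) : Prop :=
  ∃ subs, pvLookup dag v = some subs ∧ w ∈ subs

inductive pvPath (dag : List (String × List String)) : String → List String → String → Prop
  | single {v w : String} : pvEdge dag v w → pvPath dag v [] w
  | cons {v x w : String} {p : List String} : pvEdge dag v x → pvPath dag x p w → pvPath dag v (x :: p) w

def pvReach (dag : List (String × List String)) (a b : String) : Prop :=
  a = b ∨ ∃ p, pvPath dag a p b

def pvReachPlus (dag : List (String × List String)) (a b : String) : Prop :=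
  ∃ p, pvPath dag a p b

theorem pv_path_snoc {dag : List (String × List String)} {a b c : String} {p : List String}
    (h : pvPath dag a p b) (e : pvEdge dag b c) : pvPath dag a (p ++ [b]) c := by
  induction h generalizing c with
  | single e0 => exact pvPath.cons e0 (pvPath.single e)
  | cons e0 _ ih => exact pvPath.cons e0 (ih e)

theorem pv_reach_snoc {dag : List (String × List String)} {s a b : String}
    (h : pvReach dag s a) (e : pvEdge dag a b) : pvReach dag s b := by
  rcases h with rfl | ⟨p, hp⟩
  · exact Or.inr ⟨[], pvPath.single e⟩
  · exact Or.inr ⟨p ++ [a], pv_path_snoc hp e⟩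

theorem pv_path_split {dag : List (String × List String)} {a b x : String} {p1 p2 : List String}
    (h : pvPath dag a (p1 ++ x :: p2) b) : pvPath dag a p1 x ∧ pvPath dag x p2 b := by
  induction p1 generalizing a with
  | nil =>
    cases h with
    | cons e htail => exact ⟨pvPath.single e, htail⟩
  | cons y p1' ih =>
    cases h with
    | cons e htail =>
      obtain ⟨h1, h2⟩ := ih htail
      exact ⟨pvPath.cons e h1, h2⟩

theorem pv_path_join {dag : List (String × List String)} {a b x : String} {p1 p2 : List String}
    (h1 : pvPath dag a p1 x) (h2 : pvPath dag x p2 b) : pvPath dag a (p1 ++ x :: p2) b := by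
  induction h1 generalizing b with
  | single e => exact pvPath.cons e h2
  | cons e _ ih => exact pvPath.cons e (ih h2)

theorem pv_path_start_key {dag : List (String × List String)} {a b : String} {p : List String}
    (h : pvPath dag a p b) : a ∈ pvKeys dag := by
  cases h with
  | single e => exact pv_lookup_isSome.mp (by rw [e.choose_spec.1]; rfl)
  | cons e _ => exact pv_lookup_isSome.mp (by rw [e.choose_spec.1]; rfl)

theorem pv_path_mem_keys {dag : List (String × List String)} {a b : String} {p : List String}
    (h : pvPath dag a p b) : ∀ x ∈ p, x ∈ pvKeys dag := by
  induction h with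
  | single _ => intro x hx; exact absurd hx (List.not_mem_nil)
  | cons _ htail ih =>
    intro y hy
    rcases List.mem_cons.mp hy with rfl | hy'
    · exact pv_path_start_key htail
    · exact ih y hy'

-- a duplicated element splits the list with a later occurrence
theorem pv_dup_split {x : String} {l : List String} (h : List.Duplicate x l) :
    ∃ l1 l2, l = l1 ++ x :: l2 ∧ x ∈ l2 := by
  induction h with
  | cons_mem hm => exact ⟨[], _, rfl, hm⟩
  | cons_duplicate _ ih =>
    obtain ⟨l1, l2, rfl, hm⟩ := ih
    exact ⟨_ :: l1, l2, rfl, hm⟩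

-- every path can be shortened to one whose intermediate steps are distinct and avoid the start
theorem pv_path_shorten_aux {dag : List (String × List String)} :
    ∀ (n : Nat) (p : List String) (a b : String), p.length ≤ n → pvPath dag a p b →
      ∃ q, pvPath dag a q b ∧ q.Nodup ∧ a ∉ q ∧ q.length ≤ p.length := by
  intro n
  induction n with
  | zero =>
    intro p a b hlen hp
    have : p = [] := List.length_eq_zero_iff.mp (Nat.le_zero.mp hlen)
    subst this
    exact ⟨[], hp, List.nodup_nil, List.not_mem_nil, le_refl _⟩
  | succ n ih =>
    intro p a b hlen hp
    by_cases hmem : a ∈ p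
    · obtain ⟨p1, p2, rfl⟩ := List.append_of_mem hmem
      have h2 := (pv_path_split hp).2
      obtain ⟨q, hq, hqnd, hqa, hqle⟩ := ih p2 a b (by simp at hlen; omega) h2
      exact ⟨q, hq, hqnd, hqa, by simp; omega⟩
    · by_cases hnd : p.Nodup
      · exact ⟨p, hp, hnd, hmem, le_refl _⟩
      · obtain ⟨x, hdup⟩ := List.exists_duplicate_iff_not_nodup.mpr hnd
        obtain ⟨p1, p2, rfl, hx2⟩ := pv_dup_split hdup
        obtain ⟨p3, p4, rfl⟩ := List.append_of_mem hx2
        have hs1 := pv_path_split hp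
        have hs2 := pv_path_split hs1.2
        have hshort : pvPath dag a (p1 ++ x :: p4) b := pv_path_join hs1.1 hs2.2
        obtain ⟨q, hq, hqnd, hqa, hqle⟩ :=
          ih (p1 ++ x :: p4) a b (by simp at hlen ⊢; omega) hshort
        exact ⟨q, hq, hqnd, hqa, by simp at hqle ⊢; omega⟩

theorem pv_path_shorten {dag : List (String × List String)} {a b : String}
    (p : List String) (hp : pvPath dag a p b) :
    ∃ q, pvPath dag a q b ∧ q.Nodup ∧ a ∉ q ∧ q.length ≤ p.length :=
  pv_path_shorten_aux p.length p a b (le_refl _) hp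

theorem pv_nodup_length_le {l m : List String} (hnd : l.Nodup) (h : ∀ x ∈ l, x ∈ m) :
    l.length ≤ m.length :=
  (List.subperm_of_subset hnd h).length_le

theorem pvReachAux_acc_mono {dag : List (String × List String)} :
    ∀ (n : Nat) (acc : List String), ∀ x ∈ acc, x ∈ pvReachAux dag n acc := by
  intro n
  induction n with
  | zero => intro acc x hx; exact hx
  | succ n ih =>
    intro acc x hx
    exact ih _ x ((PySem.Set.mem_update acc _ x).mpr (Or.inl hx))

theorem pvReachAux_complete {dag : List (String × List String)} {b : String} :
    ∀ (p : List String) (a : String) (n : Nat) (acc : List String),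
      pvPath dag a p b → a ∈ acc → p.length + 1 ≤ n → b ∈ pvReachAux dag n acc := by
  intro p
  induction p with
  | nil =>
    intro a n acc hp ha hn
    obtain ⟨m, rfl⟩ : ∃ m, n = m + 1 := ⟨n - 1, by omega⟩
    cases hp with
    | single e =>
      obtain ⟨subs, hl, hb⟩ := e
      refine pvReachAux_acc_mono m _ b ((PySem.Set.mem_update acc _ b).mpr (Or.inr ?_))
      exact List.mem_flatMap.mpr ⟨a, ha, by rw [hl]; exact hb⟩
  | cons x p' ih =>
    intro a n acc hp ha hn
    obtain ⟨m, rfl⟩ : ∃ m, n = m + 1 := ⟨n - 1, by omega⟩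
    cases hp with
    | cons e htail =>
      obtain ⟨subs, hl, hx⟩ := e
      refine ih x m _ htail ?_ (by simp at hn; omega)
      refine (PySem.Set.mem_update acc _ x).mpr (Or.inr ?_)
      exact List.mem_flatMap.mpr ⟨a, ha, by rw [hl]; exact hx⟩

-- soundness of the acyclicity check: no step reachable from `step` lies on a cycle
theorem pv_acyc_sound {dag : List (String × List String)} {step : String}
    (hA : pvAcycBool dag step = true) :
    ∀ v, pvReach dag step v → ¬ pvReachPlus dag v v := by
  intro v hr ⟨q0, hq0⟩
  have hkeylen : (pvKeys dag).length = dag.length := by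
    rw [pvKeys, List.length_map]
  obtain ⟨q, hq, hqnd, hvq, _⟩ := pv_path_shorten q0 hq0
  have hvin : v ∈ pvReachAux dag (dag.length + 1) [step] := by
    rcases hr with rfl | ⟨p0, hp0⟩
    · exact pvReachAux_acc_mono _ _ _ (by simp)
    · obtain ⟨p, hp, hpnd, _, _⟩ := pv_path_shorten p0 hp0
      have hlen : p.length ≤ dag.length := by
        rw [← hkeylen]
        exact pv_nodup_length_le hpnd (pv_path_mem_keys hp)
      exact pvReachAux_complete p step _ _ hp (by simp) (by omega)
  have hcy : v ∈ pvReachAux dag (dag.length + 1)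
      (PySem.Set.ofList ((pvLookup dag v).getD [])) := by
    have hqlen : q.length ≤ dag.length := by
      rw [← hkeylen]
      have hvk : v ∈ pvKeys dag := pv_path_start_key hq
      refine pv_nodup_length_le hqnd (pv_path_mem_keys hq)
    cases hq with
    | single e =>
      obtain ⟨subs, hl, hb⟩ := e
      apply pvReachAux_acc_mono
      rw [hl]
      exact (PySem.Set.mem_ofList _ _).mpr hb
    | cons e htail =>
      obtain ⟨subs, hl, hx⟩ := e
      refine pvReachAux_complete _ _ _ _ htail ?_ (by simp at hqlen; omega)
      rw [hl]
      exact (PySem.Set.mem_ofList _ _).mpr hx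
  rw [pvAcycBool, List.all_eq_true] at hA
  have := hA v hvin
  simp only [Bool.not_eq_eq_eq_not, Bool.not_true, List.contains_eq_mem,
    decide_eq_false_iff_not] at this
  exact this hcy

theorem pv_uc_mono {dag : List (String × List String)} {s1 s2 : List String}
    (h : ∀ x ∈ s1, x ∈ s2) : pvUc dag s2 ≤ pvUc dag s1 := by
  apply List.Sublist.length_le
  apply List.monotone_filter_right
  intro a ha
  simp only [Bool.not_eq_eq_eq_not, Bool.not_true, List.contains_eq_mem,
    decide_eq_false_iff_not] at ha ⊢
  exact fun hc => ha (h a hc)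
theorem pvFold (dag : List (String × List String)) (step : String) (f : Nat)
    (IH : ∀ (s : String) (seen deps grays : List String),
      pvUc dag seen < f → deps.Nodup →
      pvReach dag step s →
      (∀ g ∈ grays, pvReachPlus dag g s) →
      pvClosed dag seen deps grays →
      (pvAgo dag f s deps = (pvVisit dag f s seen deps).2) ∧
      deps <+: (pvVisit dag f s seen deps).2 ∧
      (pvVisit dag f s seen deps).2.Nodup ∧
      (∀ x ∈ seen, x ∈ (pvVisit dag f s seen deps).1) ∧
      (s ∈ pvKeys dag → s ∈ (pvVisit dag f s seen deps).1) ∧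
      pvClosed dag (pvVisit dag f s seen deps).1 (pvVisit dag f s seen deps).2 grays) :
    ∀ (l : List String) (seen deps G : List String),
      pvUc dag seen < f → deps.Nodup →
      (∀ t ∈ l, pvReach dag step t) →
      (∀ t ∈ l, ∀ g ∈ G, pvReachPlus dag g t) →
      pvClosed dag seen deps G →
      (l.foldl (fun d sub => PySem.Set.union d (pvAgo dag f sub d)) deps
        = (l.foldl (fun p sub => pvVisit dag f sub p.1 p.2) (seen, deps)).2) ∧
      deps <+: (l.foldl (fun p sub => pvVisit dag f sub p.1 p.2) (seen, deps)).2 ∧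
      (l.foldl (fun p sub => pvVisit dag f sub p.1 p.2) (seen, deps)).2.Nodup ∧
      (∀ x ∈ seen, x ∈ (l.foldl (fun p sub => pvVisit dag f sub p.1 p.2) (seen, deps)).1) ∧
      (∀ t ∈ l, t ∈ pvKeys dag → t ∈ (l.foldl (fun p sub => pvVisit dag f sub p.1 p.2) (seen, deps)).1) ∧
      pvClosed dag (l.foldl (fun p sub => pvVisit dag f sub p.1 p.2) (seen, deps)).1
        (l.foldl (fun p sub => pvVisit dag f sub p.1 p.2) (seen, deps)).2 G := by
  intro l
  induction l with
  | nil =>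
    intro seen deps G _ hnd _ _ hc
    exact ⟨rfl, List.prefix_refl _, hnd, fun x hx => hx, by simp, hc⟩
  | cons t rest ihl =>
    intro seen deps G hfu hnd hrl hgl hc
    obtain ⟨hEq, hPre, hNd, hSeen, hKey, hCl⟩ :=
      IH t seen deps G hfu hnd (hrl t (by simp)) (hgl t (by simp)) hc
    have hstep : PySem.Set.union deps (pvAgo dag f t deps) = (pvVisit dag f t seen deps).2 := by
      rw [hEq]
      exact pv_union_absorb hPre hNd
    have hfu2 : pvUc dag (pvVisit dag f t seen deps).1 < f :=
      lt_of_le_of_lt (pv_uc_mono hSeen) hfu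
    obtain ⟨hEq2, hPre2, hNd2, hSeen2, hKeys2, hCl2⟩ :=
      ihl (pvVisit dag f t seen deps).1 (pvVisit dag f t seen deps).2 G hfu2 hNd
        (fun t' ht' => hrl t' (by simp [ht'])) (fun t' ht' => hgl t' (by simp [ht'])) hCl
    have hBfold : (t :: rest).foldl (fun p sub => pvVisit dag f sub p.1 p.2) (seen, deps)
        = rest.foldl (fun p sub => pvVisit dag f sub p.1 p.2)
            ((pvVisit dag f t seen deps).1, (pvVisit dag f t seen deps).2) := by
      simp only [List.foldl_cons]
    have hAfold : (t :: rest).foldl (fun d sub => PySem.Set.union d (pvAgo dag f sub d)) deps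
        = rest.foldl (fun d sub => PySem.Set.union d (pvAgo dag f sub d))
            (pvVisit dag f t seen deps).2 := by
      simp only [List.foldl_cons, hstep]
    rw [hBfold, hAfold]
    refine ⟨hEq2, hPre.trans hPre2, hNd2, fun x hx => hSeen2 x (hSeen x hx), ?_, hCl2⟩
    intro t' ht' htk
    rcases List.mem_cons.mp ht' with h | h
    · subst h
      exact hSeen2 t' (hKey htk)
    · exact hKeys2 t' h htk

theorem pvMain (dag : List (String × List String)) (step : String)
    (hP : ∀ v, pvReach dag step v → ¬ pvReachPlus dag v v) :
    ∀ (f : Nat) (s : String) (seen deps grays : List String),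
      pvUc dag seen < f → deps.Nodup →
      pvReach dag step s →
      (∀ g ∈ grays, pvReachPlus dag g s) →
      pvClosed dag seen deps grays →
      (pvAgo dag f s deps = (pvVisit dag f s seen deps).2) ∧
      deps <+: (pvVisit dag f s seen deps).2 ∧
      (pvVisit dag f s seen deps).2.Nodup ∧
      (∀ x ∈ seen, x ∈ (pvVisit dag f s seen deps).1) ∧
      (s ∈ pvKeys dag → s ∈ (pvVisit dag f s seen deps).1) ∧
      pvClosed dag (pvVisit dag f s seen deps).1 (pvVisit dag f s seen deps).2 grays := by
  intro f
  induction f with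
  | zero =>
    intro s seen deps grays hfu _ _ _ _
    exact absurd hfu (Nat.not_lt_zero _)
  | succ f ihf =>
    intro s seen deps grays hfu hnd hr hg hc
    by_cases hsn : s ∈ seen
    · have hvis : pvVisit dag (f+1) s seen deps = (seen, deps) := by
        simp [pvVisit, hsn]
      rw [hvis]
      have hsg : s ∉ grays := fun hsg => hP s hr (hg s hsg)
      exact ⟨pvAgo_closed hc (f+1) s deps (fun x hx => hx) hsn hsg,
        List.prefix_refl _, hnd, fun x hx => hx, fun _ => hsn, hc⟩
    · cases hl : pvLookup dag s with
      | none =>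
        have hvis : pvVisit dag (f+1) s seen deps = (seen, deps) := by
          simp [pvVisit, hsn, hl]
        rw [hvis]
        have hA : pvAgo dag (f+1) s deps = deps := by simp [pvAgo, hl]
        have hks : s ∉ pvKeys dag := by
          intro hk
          have := pv_lookup_isSome.mpr hk
          rw [hl] at this
          simp at this
        exact ⟨hA, List.prefix_refl _, hnd, fun x hx => hx, fun hk => absurd hk hks, hc⟩
      | some subs =>
        have hsk : s ∈ pvKeys dag := pv_lookup_isSome.mp (by rw [hl]; rfl)
        have hseen1 : PySem.Set.union seen [s] = seen ++ [s] := pv_union_singleton hsn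
        have hvis : pvVisit dag (f+1) s seen deps =
            subs.foldl (fun p sub => pvVisit dag f sub p.1 p.2)
              (seen ++ [s], PySem.Set.union deps subs) := by
          simp [pvVisit, hsn, hl, hseen1]
        have hA : pvAgo dag (f+1) s deps =
            subs.foldl (fun d sub => PySem.Set.union d (pvAgo dag f sub d))
              (PySem.Set.union deps subs) := by
          simp [pvAgo, hl]
        have hpre1 : deps <+: PySem.Set.union deps subs := pv_union_prefix deps subs
        have hnd1 : (PySem.Set.union deps subs).Nodup := PySem.Set.nodup_union deps subs hnd
        have hsubs_mem : ∀ t' ∈ subs, t' ∈ PySem.Set.union deps subs := by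
          intro t' ht'
          exact (PySem.Set.mem_union deps subs t').mpr (Or.inr ht')
        have hedge : ∀ t' ∈ subs, pvEdge dag s t' := fun t' ht' => ⟨subs, hl, ht'⟩
        have hr' : ∀ t' ∈ subs, pvReach dag step t' :=
          fun t' ht' => pv_reach_snoc hr (hedge t' ht')
        have hplus : ∀ t' ∈ subs, ∀ g ∈ grays ++ [s], pvReachPlus dag g t' := by
          intro t' ht' g hgm
          rcases List.mem_append.mp hgm with h | h
          · obtain ⟨p, hp⟩ := hg g h
            exact ⟨p ++ [s], pv_path_snoc hp (hedge t' ht')⟩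
          · rw [List.mem_singleton] at h
            subst h
            exact ⟨[], pvPath.single (hedge t' ht')⟩
        have hc' : pvClosed dag (seen ++ [s]) (PySem.Set.union deps subs) (grays ++ [s]) := by
          intro v hv hvng subs' hl'
          rcases List.mem_append.mp hv with hvs | hvs
          · have hvg : v ∉ grays := fun h => hvng (List.mem_append.mpr (Or.inl h))
            obtain ⟨h1, h2⟩ := hc v hvs hvg subs' hl'
            refine ⟨fun t' ht' => hpre1.subset (h1 t' ht'), ?_⟩
            intro t' ht' htk
            obtain ⟨hts, htg⟩ := h2 t' ht' htk
            refine ⟨List.mem_append.mpr (Or.inl hts), ?_⟩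
            intro hgm
            rcases List.mem_append.mp hgm with h | h
            · exact htg h
            · rw [List.mem_singleton] at h
              subst h
              exact hsn hts
          · rw [List.mem_singleton] at hvs
            subst hvs
            exact absurd (List.mem_append.mpr (Or.inr (List.mem_singleton.mpr rfl))) hvng
        have hfu' : pvUc dag (seen ++ [s]) < f :=
          lt_of_lt_of_le (pv_uc_lt hsk hsn) (Nat.lt_succ_iff.mp hfu)
        obtain ⟨hEq, hPre, hNd, hSeen, hKeys, hCl⟩ :=
          pvFold dag step f ihf subs (seen ++ [s]) (PySem.Set.union deps subs) (grays ++ [s])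
            hfu' hnd1 hr' hplus hc'
        rw [hvis, hA]
        refine ⟨hEq, hpre1.trans hPre, hNd, ?_, ?_, ?_⟩
        · intro x hx
          exact hSeen x (List.mem_append.mpr (Or.inl hx))
        · intro _
          exact hSeen s (List.mem_append.mpr (Or.inr (List.mem_singleton.mpr rfl)))
        · intro v hv hvg subs' hl'
          by_cases hvs : v = s
          · subst hvs
            have hsubs' : subs' = subs := by
              rw [hl] at hl'
              exact (Option.some.inj hl').symm
            subst hsubs'
            refine ⟨fun t' ht' => hPre.subset (hsubs_mem t' ht'), ?_⟩
            intro t' ht' htk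
            refine ⟨hKeys t' ht' htk, ?_⟩
            intro hgm
            obtain ⟨p, hp⟩ := hg t' hgm
            exact hP t' (hr' t' ht') ⟨p ++ [v], pv_path_snoc hp (hedge t' ht')⟩
          · have hvns : v ∉ grays ++ [s] := by
              intro hm
              rcases List.mem_append.mp hm with h | h
              · exact hvg h
              · exact hvs (List.mem_singleton.mp h)
            obtain ⟨h1, h2⟩ := hCl v hv hvns subs' hl'
            refine ⟨h1, ?_⟩
            intro t' ht' htk
            exact ⟨(h2 t' ht' htk).1, fun hgm => (h2 t' ht' htk).2 (List.mem_append.mpr (Or.inl hgm))⟩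

-- the visited set of the recursive DFS only grows
theorem pvVisit_seen_mono {dag : List (String × List String)} :
    ∀ (f : Nat) (s : String) (seen deps : List String), ∀ x ∈ seen, x ∈ (pvVisit dag f s seen deps).1 := by
  intro f
  induction f with
  | zero => intro s seen deps x hx; exact hx
  | succ f ihf =>
    intro s seen deps x hx
    have hfold : ∀ (l : List String) (p : List String × List String), ∀ y ∈ p.1,
        y ∈ (l.foldl (fun p sub => pvVisit dag f sub p.1 p.2) p).1 := by
      intro l
      induction l with
      | nil => intro p y hy; exact hy
      | cons t rest ihl =>
        intro p y hy
        rw [List.foldl_cons]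
        exact ihl _ y (ihf t p.1 p.2 y hy)
    by_cases hsn : s ∈ seen
    · simpa [pvVisit, hsn] using hx
    · cases hl : pvLookup dag s with
      | none => simpa [pvVisit, hsn, hl] using hx
      | some subs =>
        have hv : pvVisit dag (f+1) s seen deps =
            subs.foldl (fun p sub => pvVisit dag f sub p.1 p.2)
              (PySem.Set.union seen [s], PySem.Set.union deps subs) := by
          simp [pvVisit, hsn, hl]
        rw [hv]
        exact hfold subs _ x ((PySem.Set.mem_union seen [s] x).mpr (Or.inl hx))

theorem pvVisit_fold_seen_mono {dag : List (String × List String)} (f : Nat)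
    (l : List String) (p : List String × List String) :
    ∀ x ∈ p.1, x ∈ (l.foldl (fun p sub => pvVisit dag f sub p.1 p.2) p).1 := by
  induction l generalizing p with
  | nil => intro x hx; exact hx
  | cons t rest ihl =>
    intro x hx
    rw [List.foldl_cons]
    exact ihl _ x (pvVisit_seen_mono f t p.1 p.2 x hx)

-- the worklist loop of B simulates the recursive DFS: running the loop on l ++ rest is running
-- the recursive visit over l and then the loop on rest (fuel f only has to dominate pvUc seen)
theorem pvBridge {dag : List (String × List String)} :
    ∀ (f : Nat) (l rest seen deps : List String), pvUc dag seen < f →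
      pvLoop dag (l ++ rest) seen deps =
        pvLoop dag rest (l.foldl (fun p sub => pvVisit dag f sub p.1 p.2) (seen, deps)).1
                        (l.foldl (fun p sub => pvVisit dag f sub p.1 p.2) (seen, deps)).2 := by
  intro f
  induction f with
  | zero =>
    intro l rest seen deps hfu
    exact absurd hfu (Nat.not_lt_zero _)
  | succ f ihf =>
    intro l
    induction l with
    | nil =>
      intro rest seen deps _
      rfl
    | cons s l' ihl =>
      intro rest seen deps hfu
      by_cases hsn : s ∈ seen
      · have hL : pvLoop dag ((s :: l') ++ rest) seen deps = pvLoop dag (l' ++ rest) seen deps := by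
          rw [pvLoop.eq_def]
          simp [PySem.Set.contains, hsn]
        have hV : pvVisit dag (f+1) s seen deps = (seen, deps) := by
          simp [pvVisit, hsn]
        rw [hL, List.foldl_cons, hV]
        exact ihl rest seen deps hfu
      · cases hl : pvLookup dag s with
        | none =>
          have hL : pvLoop dag ((s :: l') ++ rest) seen deps = pvLoop dag (l' ++ rest) seen deps := by
            rw [pvLoop.eq_def]
            simp only [List.cons_append]
            simp only [PySem.Set.contains, List.contains_eq_mem, hsn, decide_false, Bool.false_eq_true, dite_false]
            split
            · rfl
            · rename_i substeps heq
              rw [hl] at heq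
              cases heq
          have hV : pvVisit dag (f+1) s seen deps = (seen, deps) := by
            simp [pvVisit, hsn, hl]
          rw [hL, List.foldl_cons, hV]
          exact ihl rest seen deps hfu
        | some subs =>
          have hsk : s ∈ pvKeys dag := pv_lookup_isSome.mp (by rw [hl]; rfl)
          have hL : pvLoop dag ((s :: l') ++ rest) seen deps =
              pvLoop dag (subs ++ (l' ++ rest)) (PySem.Set.union seen [s]) (PySem.Set.union deps subs) := by
            rw [pvLoop.eq_def]
            simp only [List.cons_append]
            simp only [PySem.Set.contains, List.contains_eq_mem, hsn, decide_false, Bool.false_eq_true, dite_false]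
            split
            · rename_i heq
              rw [hl] at heq
              cases heq
            · rename_i substeps heq
              rw [hl] at heq
              injection heq with h
              subst h
              rfl
          have hV : pvVisit dag (f+1) s seen deps =
              subs.foldl (fun p sub => pvVisit dag f sub p.1 p.2)
                (PySem.Set.union seen [s], PySem.Set.union deps subs) := by
            simp [pvVisit, hsn, hl]
          have hfu1 : pvUc dag (PySem.Set.union seen [s]) < f := by
            rw [pv_union_singleton hsn]
            exact lt_of_lt_of_le (pv_uc_lt hsk hsn) (Nat.lt_succ_iff.mp hfu)
          have hstep := ihf subs (l' ++ rest) (PySem.Set.union seen [s]) (PySem.Set.union deps subs) hfu1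
          set q := subs.foldl (fun p sub => pvVisit dag f sub p.1 p.2)
            (PySem.Set.union seen [s], PySem.Set.union deps subs) with hq
          have hqmono : ∀ x ∈ seen, x ∈ q.1 := by
            intro x hx
            exact pvVisit_fold_seen_mono f subs _ x ((PySem.Set.mem_union seen [s] x).mpr (Or.inl hx))
          have hfu2 : pvUc dag q.1 < f + 1 := lt_of_le_of_lt (pv_uc_mono hqmono) hfu
          rw [hL, hstep, List.foldl_cons, hV]
          exact ihl rest q.1 q.2 hfu2

-- ===== VERDICT (by name: the statement is the Claim_ definition above) =====
theorem recursive_get_all_step_dependencies_py_spec : Claim_equal_recursive_get_all_step_dependencies_py := by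
  intro dag step deps _ hpre
  obtain ⟨hdN, hacyc⟩ := hpre
  have hP := pv_acyc_sound hacyc
  have huc : pvUc dag [] < dag.length + 1 := by
    have : List.filter (fun k => !([] : List String).contains k) (pvKeys dag) = pvKeys dag := by
      rw [List.filter_eq_self]
      intro a _
      simp
    rw [pvUc, this, pvKeys, List.length_map]
    omega
  have hc0 : pvClosed dag [] deps [] := by
    intro v hv
    exact absurd hv (List.not_mem_nil)
  have hA := (pvMain dag step hP (dag.length + 1) step [] deps []
    huc hdN (Or.inl rfl) (fun g hg => absurd hg (List.not_mem_nil)) hc0).1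
  have hB : recursive_get_all_step_dependencies_py_alt dag step deps
      = (pvVisit dag (dag.length + 1) step [] deps).2 := by
    have hbr := pvBridge (dag := dag) (dag.length + 1) [step] [] [] deps huc
    simpa [recursive_get_all_step_dependencies_py_alt, PySem.Set.empty, pvLoop] using hbr
  show recursive_get_all_step_dependencies_py dag step deps
      = recursive_get_all_step_dependencies_py_alt dag step deps
  rw [recursive_get_all_step_dependencies_py, hA, hB]
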